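-- pv_equiv track=rewrite | github.com/williamdothardy33/python_algos | recursion.py | index_of_x
-- ===== SOURCE A (Python) =====
-- def index_of_x(s, pointer = 0):
--     if pointer >= len(s):
--         return -1
--     else:
--         if s[pointer] == 'x':
--             return pointer
--         else:
--             return index_of_x(s, pointer + 1)
-- ===== SOURCE B (Python) =====
-- def index_of_x(s, pointer=0):
--     while pointer < len(s):
--         if s[pointer] == 'x':
--             return pointer
--         pointer += 1
--     return -1
-- ===== Notes on version B (the rewrite author's own statement) =====
-- stated objective: idiomatic
-- what changed: Replaces the recursive descent with a plain while loop over the same index, removing Python-level recursion; Pre_ excludes pointer < -len(s), where A (and B) raise IndexError on s[pointer].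
import Mathlib
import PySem

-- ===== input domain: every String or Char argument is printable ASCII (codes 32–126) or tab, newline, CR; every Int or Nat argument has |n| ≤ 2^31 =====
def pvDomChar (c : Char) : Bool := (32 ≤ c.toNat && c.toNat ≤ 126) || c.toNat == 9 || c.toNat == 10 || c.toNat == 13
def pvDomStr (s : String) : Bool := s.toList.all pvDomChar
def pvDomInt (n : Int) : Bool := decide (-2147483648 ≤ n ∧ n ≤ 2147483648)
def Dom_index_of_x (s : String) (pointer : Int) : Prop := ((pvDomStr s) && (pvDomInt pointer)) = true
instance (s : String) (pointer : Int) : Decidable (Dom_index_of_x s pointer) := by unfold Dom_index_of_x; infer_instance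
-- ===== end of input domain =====

-- B replaces A's recursion by a plain while loop over the same index (idiomatic); return-value equivalence on Pre_.

-- ===== PORT A =====
def index_of_x (s : String) (pointer : Int) : Int :=
  if PySem.Str.len s ≤ pointer then -1
  else if PySem.Str.pyGet? s pointer = some 'x' then pointer
  else index_of_x s (pointer + 1)
termination_by (PySem.Str.len s - pointer).toNat
decreasing_by
  rename_i h
  omega

-- ===== PORT B =====
-- the while loop, with its iteration count (len(s) - pointer) as fuel
def index_of_x_loop (s : String) (pointer : Int) : Nat → Int
  | 0 => -1
  | n + 1 =>
    if PySem.Str.pyGet? s pointer = some 'x' then pointer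
    else index_of_x_loop s (pointer + 1) n

def index_of_x_alt (s : String) (pointer : Int) : Int :=
  index_of_x_loop s pointer (PySem.Str.len s - pointer).toNat

-- ===== PRECONDITION & SPEC =====
-- Pre_ excludes pointer < -len(s), where Python A (and B) raise IndexError on s[pointer].
def Pre_index_of_x (s : String) (pointer : Int) : Prop :=
  -(PySem.Str.len s) ≤ pointer
instance (s : String) (pointer : Int) : Decidable (Pre_index_of_x s pointer) := by
  unfold Pre_index_of_x; infer_instance

def pvWitness_index_of_x : String × Int := ("a xb", -3)

def Spec_index_of_x (s : String) (pointer : Int) (out : Int) : Prop := out = index_of_x_alt s pointer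
instance (s : String) (pointer : Int) (out : Int) : Decidable (Spec_index_of_x s pointer out) := by unfold Spec_index_of_x; infer_instance

-- ===== CLAIM (what is proved, stated in full; the proofs are below) =====
def Claim_equal_index_of_x : Prop := ∀ (s : String) (pointer : Int), Dom_index_of_x s pointer → Pre_index_of_x s pointer → Spec_index_of_x s pointer (index_of_x s pointer)

-- ===== LEMMAS AND PROOFS =====

theorem index_of_x_eq_loop (s : String) (n : Nat) :
    ∀ (p : Int), (PySem.Str.len s - p).toNat = n →
      index_of_x s p = index_of_x_loop s p n := by
  induction n with
  | zero =>
    intro p hn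
    have hle : PySem.Str.len s ≤ p := by omega
    rw [index_of_x, if_pos hle, index_of_x_loop]
  | succ n ih =>
    intro p hn
    have hlt : ¬ PySem.Str.len s ≤ p := by omega
    rw [index_of_x, if_neg hlt, index_of_x_loop]
    by_cases hx : PySem.Str.pyGet? s p = some 'x'
    · rw [if_pos hx, if_pos hx]
    · rw [if_neg hx, if_neg hx, ih (p + 1) (by omega)]

-- ===== VERDICT (by name: the statement is the Claim_ definition above) =====
theorem index_of_x_spec : Claim_equal_index_of_x := by
  intro s pointer _hdom _hpre
  unfold Spec_index_of_x index_of_x_alt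
  exact index_of_x_eq_loop s _ pointer rfl
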